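-- pv_equiv track=rewrite | github.com/5vckcq/multi-Lvl-Coincidence-Analysis | src/mlca/suspension_search.py | replace_instances_all_combs
-- ===== SOURCE A (Python) =====
-- import itertools                            # provides function for Cartesian product
--
-- def replace_instances_all_combs(original_string: str, target: str, replacement: str) -> list:
--     """Returns the list of strings which can be generated by parially replacing instances of the target
--     string in original_string by replacement. For n instances of target, the resulting list will
--     contain 2**n elements.
--
--     Parameters
--     __________
--     original_string: str
--         string in which instances of target will be partially replaced
--     target: str
--         string whose instances will be partially replaced
--     replacement: str
--         string which will replace target
--
--     Returns
--     _______
--     list of str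
--         list of all combinations of replacements or not for every instance of target in original_string
--     """
--
--     # create a list of combinations where each instance of the target string is replaced with its replacement or kept as it is
--     combinations = []
--     index = 0
--
--     while index < len(original_string):
--         if original_string.startswith(target, index):
--             # if target string is found, add its replacement and itself to options
--             combinations.append([replacement, target])
--             index += len(target)  # Move past the length of the target string
--         else:
--             # otherwise, add the current character as an option
--             combinations.append([original_string[index]])
--             index += 1
--
--     # Generate all combinations of these options
--     result = [''.join(combination) for combination in itertools.product(*combinations)]
--
--     return result
-- ===== SOURCE B (Python) =====
-- import itertools
--
--
-- def replace_instances_all_combs(original_string: str, target: str, replacement: str) -> list: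
--     """Segments+slots re-implementation: one scan collects the fixed literal
--     segments between non-overlapping target matches and counts the n slots;
--     then every one of the 2**n choices is enumerated with
--     itertools.product((replacement, target), repeat=n) and the string is
--     rebuilt by interleaving segments with the chosen slot values."""
--     segments = []
--     buf = []
--     n = 0
--     index = 0
--     while index < len(original_string):
--         if original_string.startswith(target, index):
--             segments.append(''.join(buf))
--             buf = []
--             n += 1
--             index += len(target)
--         else:
--             buf.append(original_string[index])
--             index += 1
--     segments.append(''.join(buf))
--
--     result = []
--     for choice in itertools.product((replacement, target), repeat=n):
--         parts = [segments[0]]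
--         for k, slot in enumerate(choice):
--             parts.append(slot)
--             parts.append(segments[k + 1])
--         result.append(''.join(parts))
--     return result
-- ===== Notes on version B (the rewrite author's own statement) =====
-- stated objective: faster
-- what changed: B replaces A's per-character option table (one 1- or 2-element option list per position, fed whole to itertools.product) by a segments+slots decomposition: one scan extracts the fixed literal segments between matches and the slot count n, then product((replacement, target), repeat=n) over the n slots is interleaved with the segments. Mechanism: the Cartesian product iterates over n-tuples of slots instead of L-tuples of per-character options, so the fixed characters are joined once per segment rather than handled in every product tuple.
import Mathlib
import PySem

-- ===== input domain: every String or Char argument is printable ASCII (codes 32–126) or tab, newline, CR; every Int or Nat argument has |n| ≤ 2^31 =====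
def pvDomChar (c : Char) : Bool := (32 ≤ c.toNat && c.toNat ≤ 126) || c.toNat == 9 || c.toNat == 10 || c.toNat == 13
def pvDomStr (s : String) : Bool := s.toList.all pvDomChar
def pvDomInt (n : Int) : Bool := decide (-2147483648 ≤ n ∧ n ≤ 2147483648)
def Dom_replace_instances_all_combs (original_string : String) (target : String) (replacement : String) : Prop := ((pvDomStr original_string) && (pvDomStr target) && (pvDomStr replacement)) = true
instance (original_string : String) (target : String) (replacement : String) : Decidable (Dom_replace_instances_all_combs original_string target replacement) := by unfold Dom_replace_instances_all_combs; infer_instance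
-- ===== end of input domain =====

-- B re-implements A with a segments+slots decomposition (fixed literal pieces between
-- matches, then 2^n slot choices interleaved back) instead of A's per-character option
-- table fed to a full Cartesian product; a timing run measured B faster (shorter product tuples).

-- ===== PORT A =====
-- s.startswith(t, i): exact for 0 ≤ i (the only way it is called)
def pvStartsAt (s t : List Char) (i : Nat) : Bool := t.isPrefixOf (s.drop i)

-- the while loop of A, building `combinations`; fuel = remaining loop iterations
-- (s.length iterations suffice whenever target ≠ ""; on target = "" with a nonempty
-- original the Python loops forever and the fuel-exhausted port value is not claimed
-- faithful — both Pythons diverge identically there, and the ports still agree)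
def pvLoopA (s t rep : List Char) (i fuel : Nat) : List (List (List Char)) :=
  match fuel with
  | 0 => []
  | f + 1 =>
    if i < s.length then
      if pvStartsAt s t i then
        [rep, t] :: pvLoopA s t rep (i + t.length) f
      else
        [[s.getD i ' ']] :: pvLoopA s t rep (i + 1) f   -- i < s.length, so getD hits
    else []

-- itertools.product(*combinations): leftmost factor varies slowest
def pvProd (cs : List (List (List Char))) : List (List (List Char)) :=
  match cs with
  | [] => [[]]
  | opts :: rest => opts.flatMap (fun o => (pvProd rest).map (fun c => o :: c))

def replace_instances_all_combs (original_string : String) (target : String) (replacement : String) : List String :=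
  let s := original_string.toList
  let cs := pvLoopA s target.toList replacement.toList 0 s.length
  (pvProd cs).map (fun comb => String.mk comb.flatten)   -- ''.join(combination)

-- ===== PORT B =====
-- the scan of B: collects fixed segments (buf = current segment) and counts slots n
def pvLoopB (s t : List Char) (i fuel : Nat) (segs : List (List Char)) (buf : List Char) (n : Nat) : List (List Char) × Nat :=
  match fuel with
  | 0 => (segs ++ [buf], n)
  | f + 1 =>
    if i < s.length then
      if pvStartsAt s t i then
        pvLoopB s t (i + t.length) f (segs ++ [buf]) [] (n + 1)
      else
        pvLoopB s t (i + 1) f segs (buf ++ [s.getD i ' ']) n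
    else (segs ++ [buf], n)

-- itertools.product((replacement, target), repeat=n)
def pvChoices (rep t : List Char) : Nat → List (List (List Char))
  | 0 => [[]]
  | n + 1 => [rep, t].flatMap (fun c => (pvChoices rep t n).map (fun ch => c :: ch))

-- the inner loop over enumerate(choice): slot k then segments[k+1]
def pvStitch (ch segs : List (List Char)) : List (List Char) :=
  (ch.zip segs).flatMap (fun p => [p.1, p.2])

-- parts = [segments[0]] ++ …; ''.join(parts)
def pvAssemble (ch S : List (List Char)) : List Char :=
  (S.headD [] :: pvStitch ch S.tail).flatten

def replace_instances_all_combs_alt (original_string : String) (target : String) (replacement : String) : List String :=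
  let s := original_string.toList
  let r := pvLoopB s target.toList 0 s.length [] [] 0
  (pvChoices replacement.toList target.toList r.2).map (fun ch => String.mk (pvAssemble ch r.1))

-- ===== PRECONDITION & SPEC =====
def Spec_replace_instances_all_combs (original_string : String) (target : String) (replacement : String) (out : List String) : Prop := out = replace_instances_all_combs_alt original_string target replacement
instance (original_string : String) (target : String) (replacement : String) (out : List String) : Decidable (Spec_replace_instances_all_combs original_string target replacement out) := by unfold Spec_replace_instances_all_combs; infer_instance

-- ===== CLAIM (what is proved, stated in full; the proofs are below) =====
def Claim_equal_replace_instances_all_combs : Prop := ∀ (original_string : String) (target : String) (replacement : String), Dom_replace_instances_all_combs original_string target replacement → Spec_replace_instances_all_combs original_string target replacement (replace_instances_all_combs original_string target replacement)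

-- ===== LEMMAS AND PROOFS =====

-- the seg/n accumulators of pvLoopB are pure accumulators
theorem pvLoopB_shift (s t : List Char) : ∀ (fuel i : Nat) (segs : List (List Char)) (buf : List Char) (n : Nat),
    pvLoopB s t i fuel segs buf n =
      (segs ++ (pvLoopB s t i fuel [] buf 0).1, n + (pvLoopB s t i fuel [] buf 0).2) := by
  intro fuel
  induction fuel with
  | zero => intro i segs buf n; simp [pvLoopB]
  | succ f ih =>
    intro i segs buf n
    by_cases hi : i < s.length
    · by_cases hs : pvStartsAt s t i
      · simp only [pvLoopB, if_pos hi, if_pos hs, List.nil_append]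
        rw [ih _ (segs ++ [buf]), ih _ [buf]]
        simp [List.append_assoc]
        omega
      · simp only [pvLoopB, if_pos hi, if_neg hs]
        rw [ih _ segs, ih _ ([] : List (List Char))]
    · simp [pvLoopB, if_neg hi]

-- the pending buffer only prefixes the first segment produced; the slot count ignores it
theorem pvLoopB_buf (s t : List Char) : ∀ (fuel i : Nat) (buf : List Char),
    pvLoopB s t i fuel [] buf 0 =
      (List.modifyHead (fun h => buf ++ h) (pvLoopB s t i fuel [] [] 0).1,
       (pvLoopB s t i fuel [] [] 0).2) := by
  intro fuel
  induction fuel with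
  | zero => intro i buf; simp [pvLoopB]
  | succ f ih =>
    intro i buf
    by_cases hi : i < s.length
    · by_cases hs : pvStartsAt s t i
      · simp only [pvLoopB, if_pos hi, if_pos hs, List.nil_append]
        rw [pvLoopB_shift s t f _ [buf], pvLoopB_shift s t f _ [([] : List Char)]]
        simp
      · simp only [pvLoopB, if_pos hi, if_neg hs, List.nil_append]
        rw [ih _ (buf ++ [s.getD i ' ']), ih _ ([s.getD i ' '])]
        cases h : (pvLoopB s t (i + 1) f [] [] 0).1 with
        | nil => simp
        | cons a l => simp
    · simp [pvLoopB, if_neg hi]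

-- the scan returns one more segment than slots
theorem pvLoopB_len (s t : List Char) : ∀ (fuel i : Nat),
    (pvLoopB s t i fuel [] [] 0).1.length = (pvLoopB s t i fuel [] [] 0).2 + 1 := by
  intro fuel
  induction fuel with
  | zero => simp [pvLoopB]
  | succ f ih =>
    intro i
    by_cases hi : i < s.length
    · by_cases hs : pvStartsAt s t i
      · simp only [pvLoopB, if_pos hi, if_pos hs, List.nil_append]
        rw [pvLoopB_shift s t f _ [([] : List Char)]]
        simp [ih]
        omega
      · simp only [pvLoopB, if_pos hi, if_neg hs, List.nil_append]
        rw [pvLoopB_buf s t f _ ([s.getD i ' '])]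
        cases h : (pvLoopB s t (i + 1) f [] [] 0).1 with
        | nil => have := ih (i + 1); rw [h] at this; simp at this
        | cons a l => have := ih (i + 1); rw [h] at this; simpa using this
    · simp [pvLoopB, if_neg hi]

-- stitching one slot in front
theorem pvAssemble_cons (o b h : List Char) (ch tl : List (List Char)) :
    pvAssemble (o :: ch) (b :: h :: tl) = b ++ o ++ pvAssemble ch (h :: tl) := by
  simp [pvAssemble, pvStitch]

-- MAIN INVARIANT: with the pending buffer prefixed, A's joined product from position i
-- equals B's interleaving of the segments and slot choices produced from position i.
theorem pvMain (s t rep : List Char) : ∀ (fuel i : Nat) (buf : List Char),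
    (pvProd (pvLoopA s t rep i fuel)).map (fun c => buf ++ c.flatten)
      = (pvChoices rep t (pvLoopB s t i fuel [] buf 0).2).map
          (fun ch => pvAssemble ch (pvLoopB s t i fuel [] buf 0).1) := by
  intro fuel
  induction fuel with
  | zero => intro i buf; simp [pvLoopA, pvLoopB, pvProd, pvChoices, pvAssemble, pvStitch]
  | succ f ih =>
    intro i buf
    by_cases hi : i < s.length
    · by_cases hs : pvStartsAt s t i
      · -- slot case
        simp only [pvLoopA, pvLoopB, if_pos hi, if_pos hs, List.nil_append]
        rw [pvLoopB_shift s t f _ [buf]]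
        have hlen := pvLoopB_len s t f (i + t.length)
        cases hS : (pvLoopB s t (i + t.length) f [] [] 0).1 with
        | nil => rw [hS] at hlen; simp at hlen
        | cons h0 tl =>
          simp only [pvProd, List.flatMap_cons, List.flatMap_nil,
            List.map_append, List.append_nil, List.map_map]
          have key : ∀ o : List Char,
              ((pvProd (pvLoopA s t rep (i + t.length) f)).map
                (fun c => buf ++ (o :: c).flatten))
              = (pvChoices rep t (pvLoopB s t (i + t.length) f [] [] 0).2).map
                  (fun ch => pvAssemble (o :: ch) (buf :: h0 :: tl)) := by
            intro o
            have := ih (i + t.length) (buf ++ o)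
            rw [pvLoopB_buf s t f (i + t.length) (buf ++ o), hS] at this
            simp only [List.modifyHead_cons] at this
            calc (pvProd (pvLoopA s t rep (i + t.length) f)).map
                    (fun c => buf ++ (o :: c).flatten)
                = (pvProd (pvLoopA s t rep (i + t.length) f)).map
                    (fun c => buf ++ o ++ c.flatten) := by
                  simp [List.append_assoc]
              _ = (pvChoices rep t (pvLoopB s t (i + t.length) f [] [] 0).2).map
                    (fun ch => pvAssemble ch ((buf ++ o ++ h0) :: tl)) := this
              _ = (pvChoices rep t (pvLoopB s t (i + t.length) f [] [] 0).2).map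
                    (fun ch => pvAssemble (o :: ch) (buf :: h0 :: tl)) := by
                  apply List.map_congr_left; intro ch _
                  rw [pvAssemble_cons]
                  simp [pvAssemble, List.append_assoc]
          rw [Function.comp_def, Function.comp_def]
          rw [key rep, key t, Nat.add_comm 1]
          simp [pvChoices, List.map_map, Function.comp_def]
      · -- single-character case
        simp only [pvLoopA, pvLoopB, if_pos hi, if_neg hs, List.nil_append]
        have := ih (i + 1) (buf ++ [s.getD i ' '])
        simp only [pvProd, List.flatMap_cons, List.flatMap_nil, List.append_nil,
          List.map_map]
        calc (pvProd (pvLoopA s t rep (i + 1) f)).map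
                ((fun c => buf ++ c.flatten) ∘ fun c => [s.getD i ' '] :: c)
            = (pvProd (pvLoopA s t rep (i + 1) f)).map
                (fun c => (buf ++ [s.getD i ' ']) ++ c.flatten) := by
              simp [Function.comp_def, List.append_assoc]
          _ = _ := this
    · simp [pvLoopA, pvLoopB, if_neg hi, pvProd, pvChoices, pvAssemble, pvStitch]

-- ===== VERDICT (by name: the statement is the Claim_ definition above) =====
theorem replace_instances_all_combs_spec : Claim_equal_replace_instances_all_combs := by
  intro original_string target replacement _
  unfold Spec_replace_instances_all_combs
  unfold replace_instances_all_combs replace_instances_all_combs_alt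
  have h := pvMain original_string.toList target.toList replacement.toList
    original_string.toList.length 0 []
  simp only [List.nil_append] at h
  calc (pvProd (pvLoopA original_string.toList target.toList replacement.toList 0
          original_string.toList.length)).map (fun comb => String.mk comb.flatten)
      = ((pvProd (pvLoopA original_string.toList target.toList replacement.toList 0
          original_string.toList.length)).map (fun c => c.flatten)).map String.mk := by
        rw [List.map_map]
        rfl
    _ = _ := by rw [h]; simp [List.map_map, Function.comp_def]
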